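-- pv_equiv track=rewrite | github.com/dmendelsohn/advent_of_code | python/src/year2021/day23/solution.py | get_pushed_room
-- ===== SOURCE A (Python) =====
-- from typing import Dict, List, NamedTuple, Optional, Set, Tuple
--
-- Room = Tuple[str, ...]  # Length 4
--
-- def get_pushed_room(_room: Room, home_char: str) -> Optional[Tuple[Room, int]]:
--     """Get the resulting room and dist of entering from the hallway (or None if impossible)"""
--     room = list(_room)
--     for i in range(3, -1, -1):
--         if not room[i]:  # Found the lowest open spot
--             room[i] = home_char
--             return tuple(room), i + 1
--         elif room[i] != home_char:  # This room cannot be entered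
--             return None
--     return None  # Room is full of home char already
-- ===== SOURCE B (Python) =====
-- def get_pushed_room(_room, home_char):
--     """Get the resulting room and dist of entering from the hallway (or None if impossible)"""
--     empties = [i for i in range(4) if not _room[i]]
--     if not empties:
--         return None  # Room has no open slot
--     idx = max(empties)  # deepest open slot
--     if any(_room[j] != home_char for j in range(idx + 1, 4)):
--         return None  # something below the slot is not the home char
--     room = list(_room)
--     room[idx] = home_char
--     return tuple(room), idx + 1
-- ===== Notes on version B (the rewrite author's own statement) =====
-- stated objective: simpler
-- what changed: A's single fused bottom-up scan with three-way early returns is replaced by a two-pass decomposition: first compute the deepest empty index (None if no cell is empty), then separately validate that every cell below it holds home_char before writing the slot.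
import Mathlib
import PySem

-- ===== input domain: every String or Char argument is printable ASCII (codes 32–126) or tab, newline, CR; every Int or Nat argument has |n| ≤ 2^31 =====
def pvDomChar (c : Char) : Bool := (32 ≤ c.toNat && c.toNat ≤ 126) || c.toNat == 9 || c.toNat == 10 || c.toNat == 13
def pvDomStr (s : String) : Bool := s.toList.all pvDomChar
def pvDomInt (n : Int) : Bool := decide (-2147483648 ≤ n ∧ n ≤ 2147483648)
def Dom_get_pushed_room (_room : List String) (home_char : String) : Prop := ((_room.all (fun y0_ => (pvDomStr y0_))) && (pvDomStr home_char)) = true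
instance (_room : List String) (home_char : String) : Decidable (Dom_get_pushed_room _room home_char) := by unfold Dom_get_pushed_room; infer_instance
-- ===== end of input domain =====

-- B replaces A's fused bottom-up early-return scan with a two-pass decomposition
-- (deepest empty index first, then suffix validation); objective: simpler.

-- ===== PORT A =====
-- the for-loop over range(3, -1, -1): early-return scan over the index list
def pvALoop (room : List String) (home_char : String) : List Int → Option (List String × Int)
  | [] => none                       -- loop fell through: room is full of home char already
  | i :: rest =>
    match PySem.List.pyGet? room i with
    | none => none                   -- IndexError (outside Pre_)
    | some cell =>
      if cell = "" then some (PySem.List.pySetD room i home_char, i + 1)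
      else if cell ≠ home_char then none
      else pvALoop room home_char rest

def get_pushed_room (_room : List String) (home_char : String) : Option (List String × Int) :=
  pvALoop _room home_char (PySem.List.pyRange 3 (-1) (-1))

-- ===== PORT B =====
def get_pushed_room_alt (_room : List String) (home_char : String) : Option (List String × Int) :=
  let empties := (PySem.List.pyRange 0 4 1).filter
      (fun i => PySem.List.pyGetD _room i "?" = "")
  match empties.max? with
  | none => none
  | some idx =>
    if (PySem.List.pyRange (idx + 1) 4 1).any
        (fun j => PySem.List.pyGetD _room j "?" ≠ home_char) then none
    else some (PySem.List.pySetD _room idx home_char, idx + 1)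

-- ===== PRECONDITION & SPEC =====
-- A indexes _room[3..0] and raises IndexError when the room has fewer than 4 cells;
-- Pre_ excludes exactly those inputs.
def Pre_get_pushed_room (_room : List String) (home_char : String) : Prop := 4 ≤ _room.length
instance (_room : List String) (home_char : String) : Decidable (Pre_get_pushed_room _room home_char) := by unfold Pre_get_pushed_room; infer_instance
def pvWitness_get_pushed_room : List String × String := (["A", "", "", "A"], "A")

def Spec_get_pushed_room (_room : List String) (home_char : String) (out : Option (List String × Int)) : Prop := out = get_pushed_room_alt _room home_char
instance (_room : List String) (home_char : String) (out : Option (List String × Int)) : Decidable (Spec_get_pushed_room _room home_char out) := by unfold Spec_get_pushed_room; infer_instance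

-- ===== CLAIM (what is proved, stated in full; the proofs are below) =====
def Claim_equal_get_pushed_room : Prop := ∀ (_room : List String) (home_char : String), Dom_get_pushed_room _room home_char → Pre_get_pushed_room _room home_char → Spec_get_pushed_room _room home_char (get_pushed_room _room home_char)

-- ===== LEMMAS AND PROOFS =====

lemma pvRange_desc : PySem.List.pyRange 3 (-1) (-1) = [3, 2, 1, 0] := by decide
lemma pvRange_04 : PySem.List.pyRange 0 4 1 = [0, 1, 2, 3] := by decide
lemma pvRange_14 : PySem.List.pyRange 1 4 1 = [1, 2, 3] := by decide
lemma pvRange_24 : PySem.List.pyRange 2 4 1 = [2, 3] := by decide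
lemma pvRange_34 : PySem.List.pyRange 3 4 1 = [3] := by decide
lemma pvRange_44 : PySem.List.pyRange 4 4 1 = [] := by decide

set_option maxHeartbeats 1000000 in
lemma pv_key (a b c d : String) (rest : List String) (hc : String) :
    get_pushed_room (a :: b :: c :: d :: rest) hc
      = get_pushed_room_alt (a :: b :: c :: d :: rest) hc := by
  have g0 : PySem.List.pyGet? (a :: b :: c :: d :: rest) 0 = some a := by simp [pysem]
  have g1 : PySem.List.pyGet? (a :: b :: c :: d :: rest) 1 = some b := by simp [pysem]
  have g2 : PySem.List.pyGet? (a :: b :: c :: d :: rest) 2 = some c := by simp [pysem]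
  have g3 : PySem.List.pyGet? (a :: b :: c :: d :: rest) 3 = some d := by simp [pysem]
  have gd0 : PySem.List.pyGetD (a :: b :: c :: d :: rest) 0 "?" = a := by simp [pysem]
  have gd1 : PySem.List.pyGetD (a :: b :: c :: d :: rest) 1 "?" = b := by simp [pysem]
  have gd2 : PySem.List.pyGetD (a :: b :: c :: d :: rest) 2 "?" = c := by simp [pysem]
  have gd3 : PySem.List.pyGetD (a :: b :: c :: d :: rest) 3 "?" = d := by simp [pysem]
  have s0 : PySem.List.pySetD (a :: b :: c :: d :: rest) 0 hc = hc :: b :: c :: d :: rest := by simp [pysem]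
  have s1 : PySem.List.pySetD (a :: b :: c :: d :: rest) 1 hc = a :: hc :: c :: d :: rest := by simp [pysem]
  have s2 : PySem.List.pySetD (a :: b :: c :: d :: rest) 2 hc = a :: b :: hc :: d :: rest := by simp [pysem]
  have s3 : PySem.List.pySetD (a :: b :: c :: d :: rest) 3 hc = a :: b :: c :: hc :: rest := by simp [pysem]
  simp only [get_pushed_room, get_pushed_room_alt, pvALoop,
    pvRange_desc, pvRange_04, g0, g1, g2, g3, gd0, gd1, gd2, gd3,
    List.filter_cons, List.filter_nil]
  by_cases h3 : d = "" <;> by_cases h2 : c = "" <;> by_cases h1 : b = "" <;> by_cases h0 : a = "" <;>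
    simp_all [List.max?, pvRange_14, pvRange_24, pvRange_34, pvRange_44, s0, s1, s2, s3] <;>
      (try (split_ifs <;> simp_all))

-- ===== VERDICT (by name: the statement is the Claim_ definition above) =====
theorem get_pushed_room_spec : Claim_equal_get_pushed_room := by
  intro _room hc _ hpre
  match _room, hpre with
  | a :: b :: c :: d :: rest, _ =>
    exact pv_key a b c d rest hc
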